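-- pv_equiv track=rewrite | github.com/nanbada/Angella-Meta-Harness | mcp-servers/scion_coordination_ops.py | _overlap_pairs
-- ===== SOURCE A (Python) =====
-- def _normalize_path(value: str) -> str:
--     normalized = value.strip().replace("\\", "/")
--     while normalized.startswith("./"):
--         normalized = normalized[2:]
--     return normalized.rstrip("/")
--
-- def _normalize_paths(values: list[str] | None) -> list[str]:
--     if not values:
--         return []
--     output: list[str] = []
--     seen: set[str] = set()
--     for value in values:
--         normalized = _normalize_path(value)
--         if not normalized or normalized in seen:
--             continue
--         seen.add(normalized)
--         output.append(normalized)
--     return sorted(output)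
--
-- def _paths_overlap(candidate: str, claimed: str) -> bool:
--     if candidate == claimed:
--         return True
--     return candidate.startswith(f"{claimed}/") or claimed.startswith(f"{candidate}/")
--
-- def _overlap_pairs(candidate_files: list[str], peer_files: list[str]) -> list[tuple[str, str]]:
--     pairs: list[tuple[str, str]] = []
--     seen: set[tuple[str, str]] = set()
--     for candidate in _normalize_paths(candidate_files):
--         for claimed in _normalize_paths(peer_files):
--             if not _paths_overlap(candidate, claimed):
--                 continue
--             pair = (candidate, claimed)
--             if pair in seen:
--                 continue
--             seen.add(pair)
--             pairs.append(pair)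
--     return pairs
-- ===== SOURCE B (Python) =====
-- def _clean(value: str) -> str:
--     v = value.strip().replace("\\", "/")
--     while v.startswith("./"):
--         v = v[2:]
--     return v.rstrip("/")
--
-- def _ancestors(path: str) -> list[str]:
--     # proper directory prefixes of path, shortest first
--     return [path[:i] for i, ch in enumerate(path) if ch == "/"]
--
-- def _normalized(values: list[str]) -> list[str]:
--     return sorted(x for x in {_clean(v) for v in values} if x)
--
-- def _overlap_pairs(candidate_files: list[str], peer_files: list[str]) -> list[tuple[str, str]]:
--     cands = _normalized(candidate_files)
--     peers = _normalized(peer_files)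
--     peer_set = set(peers)
--     # index every peer under each of its directory ancestors
--     desc: dict[str, list[str]] = {}
--     for a, p in [(a, p) for p in peers for a in _ancestors(p)]:
--         desc.setdefault(a, []).append(p)
--     pairs: list[tuple[str, str]] = []
--     for c in cands:
--         ups = [a for a in _ancestors(c) if a in peer_set]
--         if c in peer_set:
--             ups.append(c)
--         pairs += [(c, p) for p in ups]
--         pairs += [(c, p) for p in desc.get(c, [])]
--     return pairs
-- ===== Notes on version B (the rewrite author's own statement) =====
-- stated objective: faster
-- what changed: Replaces A's all-pairs candidate x peer overlap scan (with a redundant seen-set and per-candidate renormalization of the peer list) by an output-sensitive index: peers are put in a hash set and indexed under each of their directory-ancestor prefixes once, then each candidate collects its overlapping peers by looking up its own ancestor prefixes in the set and its descendants in the index.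
import Mathlib
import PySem

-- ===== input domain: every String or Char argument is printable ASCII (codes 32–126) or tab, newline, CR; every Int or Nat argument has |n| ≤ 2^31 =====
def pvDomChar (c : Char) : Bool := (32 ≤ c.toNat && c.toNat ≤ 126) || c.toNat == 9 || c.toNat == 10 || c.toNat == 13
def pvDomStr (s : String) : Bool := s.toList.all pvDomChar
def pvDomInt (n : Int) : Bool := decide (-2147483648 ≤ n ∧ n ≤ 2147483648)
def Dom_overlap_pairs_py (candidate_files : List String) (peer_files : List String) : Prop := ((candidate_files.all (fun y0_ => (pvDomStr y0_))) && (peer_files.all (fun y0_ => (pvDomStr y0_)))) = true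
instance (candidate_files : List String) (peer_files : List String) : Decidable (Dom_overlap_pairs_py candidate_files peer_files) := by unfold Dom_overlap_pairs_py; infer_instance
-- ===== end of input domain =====

-- B replaces A's all-pairs O(n*m) overlap scan by a directory-ancestor index over the peers:
-- per candidate it looks up its ancestor prefixes in a peer set and its descendants in the
-- prebuilt index (objective: faster, output-sensitive).

-- ===== PORT A =====
-- shared normalization helper: both Pythons contain the identical path-cleaning code
-- str.rstrip("/") has no PySem primitive; hand port (exact: drops exactly the trailing '/' characters)
def pvRstripSlash (cs : List Char) : List Char := (cs.reverse.dropWhile (· == '/')).reverse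

-- the `while normalized.startswith("./"): normalized = normalized[2:]` loop, on the char list (exact)
def pvDropDotSlash : List Char → List Char
  | '.' :: '/' :: rest => pvDropDotSlash rest
  | cs => cs

def pvCleanPath (value : String) : String :=
  let normalized := PySem.Str.replace (PySem.Str.strip value) "\\" "/"
  String.ofList (pvRstripSlash (pvDropDotSlash normalized.toList))

def pvNormalizePathsA (values : List String) : List String :=
  if values.isEmpty then []
  else
    let st := values.foldl (fun (acc : List String × PySem.Set String) value =>
      let normalized := pvCleanPath value
      if normalized == "" || acc.2.contains normalized then acc
      else (acc.1 ++ [normalized], acc.2.add normalized)) ([], PySem.Set.empty)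
    PySem.List.sorted st.1 (fun x => x) false

def pvPathsOverlap (candidate claimed : String) : Bool :=
  if candidate == claimed then true
  else PySem.Str.startswith candidate (claimed ++ "/") || PySem.Str.startswith claimed (candidate ++ "/")

def overlap_pairs_py (candidate_files : List String) (peer_files : List String) : List (String × String) :=
  let st := (pvNormalizePathsA candidate_files).foldl
    (fun (acc : List (String × String) × PySem.Set (String × String)) candidate =>
      (pvNormalizePathsA peer_files).foldl (fun acc claimed =>
        if !(pvPathsOverlap candidate claimed) then acc
        else if acc.2.contains (candidate, claimed) then acc
        else (acc.1 ++ [(candidate, claimed)], acc.2.add (candidate, claimed))) acc)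
    ([], PySem.Set.empty)
  st.1

-- ===== PORT B =====
-- [path[:i] for i, ch in enumerate(path) if ch == "/"]
def pvAncestors (path : String) : List String :=
  ((PySem.List.enumerate path.toList 0).filter (fun p => p.2 == '/')).map
    (fun p => String.ofList (PySem.List.slice path.toList none (some p.1)))

-- sorted(x for x in {_clean(v) for v in values} if x)
def pvNormalizedB (values : List String) : List String :=
  PySem.List.sorted ((PySem.Set.ofList (values.map pvCleanPath)).filter (fun x => x != "")) (fun x => x) false

def overlap_pairs_py_alt (candidate_files : List String) (peer_files : List String) : List (String × String) :=
  let cands := pvNormalizedB candidate_files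
  let peers := pvNormalizedB peer_files
  let peerSet := PySem.Set.ofList peers
  -- for a, p in [(a, p) for p in peers for a in _ancestors(p)]: desc.setdefault(a, []).append(p)
  let desc := (peers.flatMap (fun p => (pvAncestors p).map (fun a => (a, p)))).foldl
    (fun (d : PySem.Dict String (List String)) pr => d.modify pr.1 [] (fun l => l ++ [pr.2]))
    PySem.Dict.empty
  cands.foldl (fun pairs c =>
    let ups := (pvAncestors c).filter (fun a => peerSet.contains a)
    let ups := if peerSet.contains c then ups ++ [c] else ups
    pairs ++ ups.map (fun p => (c, p)) ++ (desc.getD c []).map (fun p => (c, p))) []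

-- ===== PRECONDITION & SPEC =====
def Spec_overlap_pairs_py (candidate_files : List String) (peer_files : List String) (out : List (String × String)) : Prop := out = overlap_pairs_py_alt candidate_files peer_files
instance (candidate_files : List String) (peer_files : List String) (out : List (String × String)) : Decidable (Spec_overlap_pairs_py candidate_files peer_files out) := by unfold Spec_overlap_pairs_py; infer_instance

-- ===== CLAIM (what is proved, stated in full; the proofs are below) =====
def Claim_equal_overlap_pairs_py : Prop := ∀ (candidate_files : List String) (peer_files : List String), Dom_overlap_pairs_py candidate_files peer_files → Spec_overlap_pairs_py candidate_files peer_files (overlap_pairs_py candidate_files peer_files)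

-- ===== LEMMAS AND PROOFS =====

theorem pv_lex_of_prefix_ne : ∀ {l1 l2 : List Char}, l1 <+: l2 → l1 ≠ l2 → List.Lex (· < ·) l1 l2 := by
  intro l1
  induction l1 with
  | nil =>
    intro l2 _ hne
    cases l2 with
    | nil => exact absurd rfl hne
    | cons b bs => exact List.Lex.nil
  | cons a t ih =>
    intro l2 hpre hne
    cases l2 with
    | nil => simp at hpre
    | cons b t2 =>
      rw [List.cons_prefix_cons] at hpre
      obtain ⟨rfl, ht⟩ := hpre
      exact List.Lex.cons (ih ht (fun h => hne (by rw [h])))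

theorem pv_str_lt_of_prefix_ne {s t : String} (h : s.toList <+: t.toList) (hne : s ≠ t) : s < t := by
  rw [String.lt_iff_toList_lt]
  exact (List.lt_iff_lex_lt _ _).mpr
    (pv_lex_of_prefix_ne h (fun hh => hne (String.toList_inj.mp hh)))

-- ancestors

theorem pv_mem_ancestors {x s : String} :
    x ∈ pvAncestors s ↔ x.toList ++ ['/'] <+: s.toList := by
  unfold pvAncestors
  simp only [List.mem_map, List.mem_filter]
  constructor
  · rintro ⟨⟨i, ch⟩, ⟨hmem, hch⟩, rfl⟩
    rw [PySem.List.mem_enumerate_iff] at hmem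
    obtain ⟨k, hk, hpk⟩ := hmem
    simp only [Prod.mk.injEq] at hpk
    obtain ⟨rfl, rfl⟩ := hpk
    simp only [beq_iff_eq] at hch
    have hslice : PySem.List.slice s.toList none (some ((0:Int) + (k:Int))) = s.toList.take k := by
      rw [zero_add, PySem.List.slice_to_natCast]
    rw [hslice, String.toList_ofList]
    have : s.toList.take k ++ ['/'] = s.toList.take (k+1) := by
      rw [List.take_succ_eq_append_getElem hk, hch]
    rw [this]
    exact List.take_prefix _ _
  · intro hpre
    have hk : x.toList.length < s.toList.length := by
      have := hpre.length_le
      simp only [List.length_append, List.length_cons, List.length_nil] at this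
      omega
    refine ⟨((0:Int) + (x.toList.length : Int), s.toList[x.toList.length]), ⟨?_, ?_⟩, ?_⟩
    · rw [PySem.List.mem_enumerate_iff]
      exact ⟨x.toList.length, hk, rfl⟩
    · have := List.IsPrefix.getElem hpre (i := x.toList.length)
        (by simp)
      simpa using this.symm
    · have hxp : x.toList <+: s.toList := (List.prefix_append _ _).trans hpre
      have htake : x.toList = s.toList.take x.toList.length := List.prefix_iff_eq_take.mp hxp
      have hslice : PySem.List.slice s.toList none (some ((0:Int) + (x.toList.length:Int)))
          = s.toList.take x.toList.length := by
        rw [zero_add, PySem.List.slice_to_natCast]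
      rw [hslice, ← htake]
      exact (String.toList_inj.mp String.toList_ofList).symm ▸ rfl

theorem pv_take_str_lt {cs : List Char} {i j : Nat} (hij : i < j) (hj : j < cs.length) :
    String.ofList (cs.take i) < String.ofList (cs.take j) := by
  apply pv_str_lt_of_prefix_ne
  · rw [String.toList_ofList, String.toList_ofList]
    have : (cs.take j).take i = cs.take i := by
      rw [List.take_take]; congr 1; omega
    rw [← this]; exact List.take_prefix _ _
  · intro h
    have := congrArg (fun s => s.toList.length) h
    simp only [String.toList_ofList, List.length_take] at this
    omega

theorem pv_ancestors_pairwise (s : String) : (pvAncestors s).Pairwise (· < ·) := by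
  unfold pvAncestors
  rw [List.pairwise_map]
  have hp : ((PySem.List.enumerate s.toList 0).filter (fun p => p.2 == '/')).Pairwise
      (fun p q => p.1 < q.1) := (PySem.List.pairwise_lt_enumerate s.toList 0).filter _
  refine List.Pairwise.imp_of_mem ?_ hp
  intro a b ha hb hab
  have ha' := List.mem_of_mem_filter ha
  have hb' := List.mem_of_mem_filter hb
  rw [PySem.List.mem_enumerate_iff] at ha' hb'
  obtain ⟨ka, hka, rfl⟩ := ha'
  obtain ⟨kb, hkb, rfl⟩ := hb'
  have hklt : ka < kb := by simpa using hab
  simp only [zero_add]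
  rw [PySem.List.slice_to_natCast, PySem.List.slice_to_natCast]
  exact pv_take_str_lt hklt hkb

theorem pv_ancestors_lt {x s : String} (h : x ∈ pvAncestors s) : x < s := by
  have hpre := pv_mem_ancestors.mp h
  apply pv_str_lt_of_prefix_ne ((List.prefix_append _ _).trans hpre)
  intro rfl'
  subst rfl'
  have := hpre.length_le
  simp at this

theorem pv_toList_append_slash (s : String) : (s ++ "/").toList = s.toList ++ ['/'] := by
  simp

theorem pv_overlap_iff {c p : String} :
    pvPathsOverlap c p = true ↔ ((p = c ∨ p.toList ++ ['/'] <+: c.toList) ∨ c.toList ++ ['/'] <+: p.toList) := by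
  unfold pvPathsOverlap
  by_cases h : c = p
  · subst h; simp
  · rw [if_neg (by simpa using fun hh => h hh)]
    rw [Bool.or_eq_true, PySem.Str.startswith_eq, PySem.Str.startswith_eq,
      PySem.Chars.startswith_iff, PySem.Chars.startswith_iff,
      pv_toList_append_slash, pv_toList_append_slash]
    constructor
    · rintro (h1 | h2)
      · exact Or.inl (Or.inr h1)
      · exact Or.inr h2
    · rintro ((rfl | h1) | h2)
      · exact absurd rfl h
      · exact Or.inl h1
      · exact Or.inr h2

theorem pv_normfold (l : List String) (acc : List String) (seen : PySem.Set String)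
    (hinv : ∀ x, x ∈ seen ↔ x ∈ acc) (hnd : acc.Nodup) :
    (l.foldl (fun (acc : List String × PySem.Set String) value =>
        if pvCleanPath value == "" || acc.2.contains (pvCleanPath value) then acc
        else (acc.1 ++ [pvCleanPath value], acc.2.add (pvCleanPath value))) (acc, seen)).1.Nodup
    ∧ ∀ x, x ∈ (l.foldl (fun (acc : List String × PySem.Set String) value =>
        if pvCleanPath value == "" || acc.2.contains (pvCleanPath value) then acc
        else (acc.1 ++ [pvCleanPath value], acc.2.add (pvCleanPath value))) (acc, seen)).1
        ↔ x ∈ acc ∨ (x ∈ l.map pvCleanPath ∧ x ≠ "") := by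
  induction l generalizing acc seen with
  | nil => simpa using hnd
  | cons v t ih =>
    rw [List.foldl_cons]
    by_cases hskip : pvCleanPath v = "" ∨ pvCleanPath v ∈ acc
    · have hc : (pvCleanPath v == "" || seen.contains (pvCleanPath v)) = true := by
        rcases hskip with h | h
        · simp [h]
        · simp [(hinv _).mpr h]
      rw [if_pos hc]
      obtain ⟨ihn, ihm⟩ := ih acc seen hinv hnd
      refine ⟨ihn, fun x => ?_⟩
      rw [ihm x]
      constructor
      · rintro (h | ⟨hm, hne⟩)
        · exact Or.inl h
        · exact Or.inr ⟨List.mem_cons_of_mem _ hm, hne⟩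
      · rintro (h | ⟨hm, hne⟩)
        · exact Or.inl h
        · rw [List.map_cons] at hm
          rcases List.mem_cons.mp hm with h1 | h1
          · subst h1
            rcases hskip with h2 | h2
            · exact absurd h2 hne
            · exact Or.inl h2
          · exact Or.inr ⟨h1, hne⟩
    · push Not at hskip
      obtain ⟨hne0, hnm⟩ := hskip
      have hc : (pvCleanPath v == "" || seen.contains (pvCleanPath v)) = false := by
        have h1 : (pvCleanPath v == "") = false := by simpa using hne0
        have h2 : seen.contains (pvCleanPath v) = false := by
          rw [Bool.eq_false_iff]
          intro hh
          exact hnm ((hinv _).mp ((PySem.Set.contains_iff _ _).mp hh))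
        rw [h1, h2]; rfl
      rw [if_neg (fun hh => by rw [hc] at hh; exact Bool.false_ne_true hh)]
      have hnd' : (acc ++ [pvCleanPath v]).Nodup :=
        List.Nodup.append hnd (List.nodup_singleton _) (by simpa using hnm)
      have hinv' : ∀ x, x ∈ seen.add (pvCleanPath v) ↔ x ∈ acc ++ [pvCleanPath v] := by
        intro x
        rw [PySem.Set.mem_add]
        simp [hinv x]
      obtain ⟨ihn, ihm⟩ := ih (acc ++ [pvCleanPath v]) (seen.add (pvCleanPath v)) hinv' hnd'
      refine ⟨ihn, fun x => ?_⟩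
      rw [ihm x]
      simp only [List.mem_append, List.mem_cons, List.not_mem_nil, or_false, List.map_cons]
      constructor
      · rintro ((h | rfl) | ⟨hm, hne⟩)
        · exact Or.inl h
        · exact Or.inr ⟨Or.inl rfl, hne0⟩
        · exact Or.inr ⟨Or.inr hm, hne⟩
      · rintro (h | ⟨(rfl | hm), hne⟩)
        · exact Or.inl (Or.inl h)
        · exact Or.inl (Or.inr rfl)
        · exact Or.inr ⟨hm, hne⟩

theorem pv_norm_eq (values : List String) : pvNormalizePathsA values = pvNormalizedB values := by
  unfold pvNormalizePathsA pvNormalizedB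
  by_cases hemp : values.isEmpty
  · rw [if_pos hemp]
    have : values = [] := List.isEmpty_iff.mp hemp
    subst this
    simp [PySem.List.sorted_eq_nil_iff]
  · rw [if_neg hemp]
    have hfold := pv_normfold values [] PySem.Set.empty (by
      intro x
      simp [PySem.Set.empty]) List.nodup_nil
    obtain ⟨hnd, hmem⟩ := hfold
    apply PySem.List.sorted_eq_sorted_of_perm _ _ _ (fun a b h => h)
    rw [List.perm_ext_iff_of_nodup hnd (List.Nodup.filter _ (PySem.Set.nodup_ofList _))]
    intro x
    rw [hmem x]
    simp only [List.mem_filter, PySem.Set.mem_ofList, List.not_mem_nil, false_or, bne_iff_ne,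
      ne_eq]

theorem pv_norm_pairwise (values : List String) : (pvNormalizedB values).Pairwise (· < ·) := by
  unfold pvNormalizedB
  have hnd : ((PySem.Set.ofList (values.map pvCleanPath)).filter (fun x => x != "")).Nodup :=
    List.Nodup.filter _ (PySem.Set.nodup_ofList _)
  have hperm := PySem.List.sorted_perm ((PySem.Set.ofList (values.map pvCleanPath)).filter (fun x => x != "")) (fun x => x) false
  have hnds : (PySem.List.sorted ((PySem.Set.ofList (values.map pvCleanPath)).filter (fun x => x != "")) (fun x => x) false).Nodup :=
    hperm.nodup_iff.mpr hnd
  have hle := PySem.List.sorted_pairwise ((PySem.Set.ofList (values.map pvCleanPath)).filter (fun x => x != "")) (fun x => x)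
  exact (hle.and hnds).imp (fun h => lt_of_le_of_ne h.1 h.2)

theorem pv_filter_or_split (l : List String) (q1 q2 : String → Bool) (hl : l.Pairwise (· < ·))
    (h12 : ∀ x y, q1 x = true → q2 y = true → x < y) :
    l.filter (fun x => q1 x || q2 x) = l.filter q1 ++ l.filter q2 := by
  induction l with
  | nil => simp
  | cons h t ih =>
    rw [List.pairwise_cons] at hl
    obtain ⟨hlt, htp⟩ := hl
    by_cases h1 : q1 h = true
    · have hq2 : q2 h = false := by
        rw [Bool.eq_false_iff]
        intro h2
        exact absurd (h12 h h h1 h2) (lt_irrefl h)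
      rw [List.filter_cons_of_pos (by simp [h1]), List.filter_cons_of_pos h1, ih htp,
        List.filter_cons_of_neg (by simp [hq2])]
      simp
    · by_cases h2 : q2 h = true
      · have ht1 : t.filter q1 = [] := by
          rw [List.filter_eq_nil_iff]
          intro y hy hq1y
          exact absurd (hlt y hy) (not_lt_of_gt (h12 y h hq1y h2))
        have ht1' : (h :: t).filter q1 = [] := by
          rw [List.filter_cons_of_neg (by simp [h1]), ht1]
        rw [List.filter_cons_of_pos (by simp [h2]), ht1', ih htp, ht1]
        rw [List.filter_cons_of_pos h2]
        simp
      · rw [List.filter_cons_of_neg (by simp [h1, h2]),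
          List.filter_cons_of_neg (by simp [h1]),
          List.filter_cons_of_neg (by simp [h2]), ih htp]

theorem pv_filter_map {α β : Type} (l : List α) (f : α → β) (q : β → Bool) :
    (l.map f).filter q = (l.filter (fun x => q (f x))).map f := by
  induction l with
  | nil => rfl
  | cons h t ih => by_cases hq : q (f h) <;> simp [hq, ih]

theorem pv_filter_eq_flatMap {α : Type} (l : List α) (q : α → Bool) :
    l.filter q = l.flatMap (fun x => if q x then [x] else []) := by
  induction l with
  | nil => rfl
  | cons h t ih => by_cases hq : q h <;> simp [hq, ih]

theorem pv_filter_beq_of_mem {α : Type} [DecidableEq α] (l : List α) (a : α) (h : l.Nodup)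
    (hm : a ∈ l) : l.filter (fun x => x == a) = [a] := by
  induction l with
  | nil => simp at hm
  | cons x t ih =>
    rw [List.nodup_cons] at h
    rcases List.mem_cons.mp hm with rfl | hm'
    · rw [List.filter_cons_of_pos (by simp)]
      have : t.filter (fun y => y == a) = [] := by
        rw [List.filter_eq_nil_iff]; intro y hy hb
        exact h.1 (by simpa using (beq_iff_eq.mp hb) ▸ hy)
      rw [this]
    · rw [List.filter_cons_of_neg (by simp; rintro rfl; exact h.1 hm'), ih h.2 hm']

theorem pv_filter_beq_of_not_mem {α : Type} [DecidableEq α] (l : List α) (a : α) (hm : a ∉ l) :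
    l.filter (fun x => x == a) = [] := by
  rw [List.filter_eq_nil_iff]; intro y hy hb
  exact hm ((beq_iff_eq.mp hb) ▸ hy)

theorem pv_ancestors_nodup (s : String) : (pvAncestors s).Nodup :=
  (pv_ancestors_pairwise s).imp (fun h => ne_of_lt h)

theorem pv_desc_getD (peers : List String) (c : String) (hnd : peers.Nodup) :
    ((peers.flatMap (fun p => (pvAncestors p).map (fun a => (a, p)))).foldl
      (fun (d : PySem.Dict String (List String)) pr => d.modify pr.1 [] (fun l => l ++ [pr.2]))
      PySem.Dict.empty).getD c []
    = peers.filter (fun p => PySem.Chars.startswith p.toList (c.toList ++ ['/'])) := by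
  rw [PySem.Dict.getD_foldl_modify_append]
  have hempty : (PySem.Dict.empty : PySem.Dict String (List String)).getD c [] = [] := rfl
  rw [hempty, List.nil_append, List.filter_flatMap]
  have hper : ∀ p, ((pvAncestors p).map (fun a => (a, p))).filter (fun pr => pr.1 == c)
      = if PySem.Chars.startswith p.toList (c.toList ++ ['/']) then [(c, p)] else [] := by
    intro p
    rw [pv_filter_map]
    by_cases hm : c ∈ pvAncestors p
    · rw [if_pos (by
        rw [PySem.Chars.startswith_iff]
        exact pv_mem_ancestors.mp hm)]
      rw [pv_filter_beq_of_mem _ _ (pv_ancestors_nodup p) hm]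
      rfl
    · rw [if_neg (by
        rw [PySem.Chars.startswith_iff]
        exact fun hpre => hm (pv_mem_ancestors.mpr hpre))]
      rw [pv_filter_beq_of_not_mem _ _ hm]
      rfl
  calc (peers.flatMap fun p => (((pvAncestors p).map (fun a => (a, p))).filter (fun pr => pr.1 == c))).map (fun x => x.2)
      = (peers.flatMap fun p => if PySem.Chars.startswith p.toList (c.toList ++ ['/']) then [(c, p)] else []).map (fun x => x.2) := by
        rw [List.flatMap_congr (fun p _ => hper p)]
    _ = peers.flatMap fun p => if PySem.Chars.startswith p.toList (c.toList ++ ['/']) then [p] else [] := by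
        rw [List.map_flatMap]
        apply List.flatMap_congr
        intro p _
        by_cases hs : PySem.Chars.startswith p.toList (c.toList ++ ['/']) <;> simp [hs]
    _ = peers.filter (fun p => PySem.Chars.startswith p.toList (c.toList ++ ['/'])) := by
        rw [← pv_filter_eq_flatMap]

theorem pv_ups_eq (peers : List String) (c : String) (hp : peers.Pairwise (· < ·)) :
    (let ups := (pvAncestors c).filter (fun a => (PySem.Set.ofList peers).contains a)
     if (PySem.Set.ofList peers).contains c then ups ++ [c] else ups)
    = peers.filter (fun p => (p == c) || PySem.Chars.startswith c.toList (p.toList ++ ['/'])) := by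
  have hmemS : ∀ x, (PySem.Set.ofList peers).contains x = true ↔ x ∈ peers := by
    intro x
    rw [PySem.Set.contains_iff, PySem.Set.mem_ofList]
  have hndp : peers.Nodup := hp.imp (fun h => ne_of_lt h)
  have hpr : (peers.filter (fun p => (p == c) || PySem.Chars.startswith c.toList (p.toList ++ ['/']))).Pairwise (· < ·) :=
    hp.filter _
  have hupspw : ((pvAncestors c).filter (fun a => (PySem.Set.ofList peers).contains a)).Pairwise (· < ·) :=
    (pv_ancestors_pairwise c).filter _
  have hmemL : ∀ x, (x ∈ (let ups := (pvAncestors c).filter (fun a => (PySem.Set.ofList peers).contains a)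
      if (PySem.Set.ofList peers).contains c then ups ++ [c] else ups))
      ↔ (x ∈ peers ∧ ((x == c) || PySem.Chars.startswith c.toList (x.toList ++ ['/'])) = true) := by
    intro x
    simp only []
    constructor
    · intro hx
      by_cases hc : (PySem.Set.ofList peers).contains c = true
      · rw [if_pos hc] at hx
        rcases List.mem_append.mp hx with hx1 | hx1
        · obtain ⟨hxa, hxs⟩ := List.mem_filter.mp hx1
          refine ⟨(hmemS x).mp hxs, ?_⟩
          have := pv_mem_ancestors.mp hxa
          simp [PySem.Chars.startswith_iff, this]
        · have : x = c := by simpa using hx1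
          subst this
          exact ⟨(hmemS x).mp hc, by simp⟩
      · rw [if_neg hc] at hx
        obtain ⟨hxa, hxs⟩ := List.mem_filter.mp hx
        refine ⟨(hmemS x).mp hxs, ?_⟩
        have := pv_mem_ancestors.mp hxa
        simp [PySem.Chars.startswith_iff, this]
    · rintro ⟨hxp, hq⟩
      rw [Bool.or_eq_true] at hq
      rcases hq with hq | hq
    -- x = c
      · have hxc : x = c := beq_iff_eq.mp hq
        subst hxc
        rw [if_pos ((hmemS x).mpr hxp)]
        exact List.mem_append.mpr (Or.inr (by simp))
      · have hxa : x ∈ pvAncestors c := pv_mem_ancestors.mpr ((PySem.Chars.startswith_iff _ _).mp hq)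
        have hin : x ∈ (pvAncestors c).filter (fun a => (PySem.Set.ofList peers).contains a) :=
          List.mem_filter.mpr ⟨hxa, (hmemS x).mpr hxp⟩
        by_cases hc : (PySem.Set.ofList peers).contains c = true
        · rw [if_pos hc]; exact List.mem_append.mpr (Or.inl hin)
        · rw [if_neg hc]; exact hin
  have hlpw : ((let ups := (pvAncestors c).filter (fun a => (PySem.Set.ofList peers).contains a)
      if (PySem.Set.ofList peers).contains c then ups ++ [c] else ups)).Pairwise (· < ·) := by
    simp only []
    by_cases hc : (PySem.Set.ofList peers).contains c = true
    · rw [if_pos hc]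
      rw [List.pairwise_append]
      refine ⟨hupspw, List.pairwise_singleton _ _, ?_⟩
      intro x hx y hy
      have : y = c := by simpa using hy
      subst this
      exact pv_ancestors_lt (List.mem_filter.mp hx).1
    · rw [if_neg hc]; exact hupspw
  have hndL := hlpw.imp (fun h => ne_of_lt h)
  have hndR := hpr.imp (fun h : _ < _ => ne_of_lt h)
  have hperm : ((let ups := (pvAncestors c).filter (fun a => (PySem.Set.ofList peers).contains a)
      if (PySem.Set.ofList peers).contains c then ups ++ [c] else ups)).Perm
      (peers.filter (fun p => (p == c) || PySem.Chars.startswith c.toList (p.toList ++ ['/']))) := by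
    rw [List.perm_ext_iff_of_nodup hndL hndR]
    intro x
    rw [hmemL x, List.mem_filter]
  exact List.eq_of_perm_of_sorted (fun a b _ _ h h' => absurd h' (lt_asymm h)) hlpw hpr hperm

theorem pv_row_eq (peers : List String) (c : String) (hp : peers.Pairwise (· < ·)) :
    peers.filter (fun p => pvPathsOverlap c p)
    = (let ups := (pvAncestors c).filter (fun a => (PySem.Set.ofList peers).contains a)
       if (PySem.Set.ofList peers).contains c then ups ++ [c] else ups)
      ++ peers.filter (fun p => PySem.Chars.startswith p.toList (c.toList ++ ['/'])) := by
  have hcong : peers.filter (fun p => pvPathsOverlap c p)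
      = peers.filter (fun p => ((p == c) || PySem.Chars.startswith c.toList (p.toList ++ ['/']))
          || PySem.Chars.startswith p.toList (c.toList ++ ['/'])) := by
    apply List.filter_congr
    intro p _
    rw [Bool.eq_iff_iff]
    rw [pv_overlap_iff]
    simp [PySem.Chars.startswith_iff, beq_iff_eq]
  rw [hcong]
  rw [pv_filter_or_split peers _ _ hp (by
    intro x y hq1 hq2
    have hy : c < y := by
      apply pv_str_lt_of_prefix_ne ((List.prefix_append _ _).trans ((PySem.Chars.startswith_iff _ _).mp hq2))
      intro rfl'
      subst rfl'
      have := ((PySem.Chars.startswith_iff _ _).mp hq2).length_le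
      simp at this
    rw [Bool.or_eq_true] at hq1
    rcases hq1 with hq1 | hq1
    · exact (beq_iff_eq.mp hq1) ▸ hy
    · exact lt_trans (pv_ancestors_lt (pv_mem_ancestors.mpr ((PySem.Chars.startswith_iff _ _).mp hq1))) hy)]
  rw [pv_ups_eq peers c hp]

theorem pv_inner_fold (c : String) (ps : List String) (acc : List (String × String))
    (seen : PySem.Set (String × String)) (hnd : ps.Nodup)
    (hseen : ∀ p ∈ ps, (c, p) ∉ seen) :
    (ps.foldl (fun (acc : List (String × String) × PySem.Set (String × String)) claimed =>
        if !(pvPathsOverlap c claimed) then acc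
        else if acc.2.contains (c, claimed) then acc
        else (acc.1 ++ [(c, claimed)], acc.2.add (c, claimed))) (acc, seen)).1
      = acc ++ (ps.filter (fun p => pvPathsOverlap c p)).map (fun p => (c, p))
    ∧ ∀ x ∈ (ps.foldl (fun (acc : List (String × String) × PySem.Set (String × String)) claimed =>
        if !(pvPathsOverlap c claimed) then acc
        else if acc.2.contains (c, claimed) then acc
        else (acc.1 ++ [(c, claimed)], acc.2.add (c, claimed))) (acc, seen)).2,
        x ∈ seen ∨ x.1 = c := by
  induction ps generalizing acc seen with
  | nil => exact ⟨by simp, fun x hx => Or.inl hx⟩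
  | cons p t ih =>
    rw [List.nodup_cons] at hnd
    rw [List.foldl_cons]
    by_cases hov : pvPathsOverlap c p = true
    · have hnc : seen.contains (c, p) = false := by
        rw [Bool.eq_false_iff]
        intro hh
        exact hseen p (List.mem_cons_self) ((PySem.Set.contains_iff _ _).mp hh)
      rw [if_neg (by simp [hov]), if_neg (by rw [hnc]; exact Bool.false_ne_true)]
      have hseen' : ∀ q ∈ t, (c, q) ∉ seen.add (c, p) := by
        intro q hq hmem
        rcases (PySem.Set.mem_add _ _ _).mp hmem with h1 | h1
        · exact hseen q (List.mem_cons_of_mem _ hq) h1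
        · have : q = p := by simpa using h1
          exact hnd.1 (this ▸ hq)
      obtain ⟨ih1, ih2⟩ := ih (acc ++ [(c, p)]) (seen.add (c, p)) hnd.2 hseen'
      refine ⟨?_, ?_⟩
      · rw [ih1, List.filter_cons_of_pos hov]
        simp
      · intro x hx
        rcases ih2 x hx with h1 | h1
        · rcases (PySem.Set.mem_add _ _ _).mp h1 with h2 | h2
          · exact Or.inl h2
          · exact Or.inr (by rw [h2])
        · exact Or.inr h1
    · rw [if_pos (by simp [hov])]
      obtain ⟨ih1, ih2⟩ := ih acc seen hnd.2 (fun q hq => hseen q (List.mem_cons_of_mem _ hq))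
      refine ⟨?_, ih2⟩
      rw [ih1, List.filter_cons_of_neg (by simpa using hov)]

theorem pv_outer_fold (peers : List String) (cs : List String) (acc : List (String × String))
    (seen : PySem.Set (String × String)) (hcs : cs.Nodup) (hp : peers.Nodup)
    (hseen : ∀ x ∈ seen, x.1 ∉ cs) :
    (cs.foldl (fun (acc : List (String × String) × PySem.Set (String × String)) candidate =>
        peers.foldl (fun acc claimed =>
          if !(pvPathsOverlap candidate claimed) then acc
          else if acc.2.contains (candidate, claimed) then acc
          else (acc.1 ++ [(candidate, claimed)], acc.2.add (candidate, claimed))) acc)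
      (acc, seen)).1
    = acc ++ cs.flatMap (fun c => (peers.filter (fun p => pvPathsOverlap c p)).map (fun p => (c, p))) := by
  induction cs generalizing acc seen with
  | nil => simp
  | cons c t ih =>
    rw [List.nodup_cons] at hcs
    rw [List.foldl_cons]
    have hseenc : ∀ p ∈ peers, (c, p) ∉ seen := by
      intro p _ hmem
      exact hseen (c, p) hmem List.mem_cons_self
    obtain ⟨h1, h2⟩ := pv_inner_fold c peers acc seen hp hseenc
    have hpair : (peers.foldl (fun (acc : List (String × String) × PySem.Set (String × String)) claimed =>
        if !(pvPathsOverlap c claimed) then acc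
        else if acc.2.contains (c, claimed) then acc
        else (acc.1 ++ [(c, claimed)], acc.2.add (c, claimed))) (acc, seen))
        = ((peers.foldl (fun (acc : List (String × String) × PySem.Set (String × String)) claimed =>
        if !(pvPathsOverlap c claimed) then acc
        else if acc.2.contains (c, claimed) then acc
        else (acc.1 ++ [(c, claimed)], acc.2.add (c, claimed))) (acc, seen)).1,
          (peers.foldl (fun (acc : List (String × String) × PySem.Set (String × String)) claimed =>
        if !(pvPathsOverlap c claimed) then acc
        else if acc.2.contains (c, claimed) then acc
        else (acc.1 ++ [(c, claimed)], acc.2.add (c, claimed))) (acc, seen)).2) := rfl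
    rw [hpair, h1]
    rw [ih _ _ hcs.2 (by
      intro x hx hxt
      rcases h2 x hx with hmem | hfst
      · exact hseen x hmem (List.mem_cons_of_mem _ hxt)
      · exact hcs.1 (hfst ▸ hxt))]
    rw [List.flatMap_cons, List.append_assoc]

theorem overlap_pairs_py_spec_main (cf pf : List String) :
    overlap_pairs_py cf pf = overlap_pairs_py_alt cf pf := by
  unfold overlap_pairs_py overlap_pairs_py_alt
  simp only []
  have hppw := pv_norm_pairwise pf
  have hcpw := pv_norm_pairwise cf
  have hndp : (pvNormalizedB pf).Nodup := hppw.imp (fun h => ne_of_lt h)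
  have hndc : (pvNormalizedB cf).Nodup := hcpw.imp (fun h => ne_of_lt h)
  rw [pv_norm_eq cf, pv_norm_eq pf]
  rw [pv_outer_fold (pvNormalizedB pf) (pvNormalizedB cf) [] PySem.Set.empty hndc hndp
    (by intro x hx; simp [PySem.Set.empty] at hx)]
  rw [List.nil_append]
  have hfoldB : (pvNormalizedB cf).foldl (fun pairs c =>
      pairs ++ ((let ups := (pvAncestors c).filter (fun a => (PySem.Set.ofList (pvNormalizedB pf)).contains a)
        if (PySem.Set.ofList (pvNormalizedB pf)).contains c then ups ++ [c] else ups)).map (fun p => (c, p))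
        ++ ((((pvNormalizedB pf).flatMap (fun p => (pvAncestors p).map (fun a => (a, p)))).foldl
          (fun (d : PySem.Dict String (List String)) pr => d.modify pr.1 [] (fun l => l ++ [pr.2]))
          PySem.Dict.empty).getD c []).map (fun p => (c, p))) []
      = (pvNormalizedB cf).flatMap (fun c =>
        ((let ups := (pvAncestors c).filter (fun a => (PySem.Set.ofList (pvNormalizedB pf)).contains a)
          if (PySem.Set.ofList (pvNormalizedB pf)).contains c then ups ++ [c] else ups)).map (fun p => (c, p))
        ++ ((((pvNormalizedB pf).flatMap (fun p => (pvAncestors p).map (fun a => (a, p)))).foldl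
          (fun (d : PySem.Dict String (List String)) pr => d.modify pr.1 [] (fun l => l ++ [pr.2]))
          PySem.Dict.empty).getD c []).map (fun p => (c, p))) := by
    have := PySem.List.foldl_append_eq_flatMap (fun c =>
        ((let ups := (pvAncestors c).filter (fun a => (PySem.Set.ofList (pvNormalizedB pf)).contains a)
          if (PySem.Set.ofList (pvNormalizedB pf)).contains c then ups ++ [c] else ups)).map (fun p => (c, p))
        ++ ((((pvNormalizedB pf).flatMap (fun p => (pvAncestors p).map (fun a => (a, p)))).foldl
          (fun (d : PySem.Dict String (List String)) pr => d.modify pr.1 [] (fun l => l ++ [pr.2]))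
          PySem.Dict.empty).getD c []).map (fun p => (c, p))) (pvNormalizedB cf) []
    rw [List.nil_append] at this
    rw [← this]
    apply List.foldl_ext
    intro acc x _
    rw [List.append_assoc]
  rw [hfoldB]
  apply List.flatMap_congr
  intro c _
  rw [pv_row_eq (pvNormalizedB pf) c hppw, List.map_append]
  rw [pv_desc_getD (pvNormalizedB pf) c hndp]

-- ===== VERDICT (by name: the statement is the Claim_ definition above) =====
theorem overlap_pairs_py_spec : Claim_equal_overlap_pairs_py := by
  intro candidate_files peer_files _
  unfold Spec_overlap_pairs_py
  exact overlap_pairs_py_spec_main candidate_files peer_files
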